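-- pv_equiv track=rewrite | github.com/HaiAu2501/Online-3D-Bin-Packing-Problem | generator/sequence.py | find_valid_sequences_zyx
-- ===== SOURCE A (Python) =====
-- from collections import deque
-- from typing import List, Tuple
--
-- def find_valid_sequences_zyx(items: List[Tuple[int, int, int, int, int, int]], k: int) -> List[List[Tuple[int, int, int, int, int, int]]]:
--     """
--     Finds all valid sequences of items where the removal order is sorted by (z, y, x).
--
--     Args:
--         items: List of items, each represented as a tuple (x, y, z, w, l, h).
--         k: Size of the buffer.
--
--     Returns:
--         A list of valid sequences, where each sequence is a list of items.
--     """
--     n = len(items)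
--     total = n
--     # Sort desired removals lexicographically by (z, y, x)
--     desired_removals_sorted = sorted(items, key=lambda item: (item[2], item[1], item[0]))
--     desired_removals = [ (item[2], item[1], item[0]) for item in desired_removals_sorted ]
--
--     results = []
--     used = [False] * n
--     current_sequence = []
--
--     def backtrack(sequence: List[int]):
--         if len(sequence) == total:
--             # After building the full sequence, check the removal process
--             if simulate_removal([items[i] for i in sequence], desired_removals):
--                 # Convert indices back to items
--                 results.append([items[i] for i in sequence])
--             return
--
--         for i in range(n):
--             if not used[i]:
--                 # Choose this item
--                 used[i] = True
--                 sequence.append(i)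
--                 # Optional Pruning: Early validation can be added here
--                 backtrack(sequence)
--                 # Backtrack
--                 sequence.pop()
--                 used[i] = False
--
--     def simulate_removal(seq: List[Tuple[int, int, int, int, int, int]], desired: List[Tuple[int, int, int]]) -> bool:
--         """
--         Simulates the removal process and verifies if the removal order matches the desired sequence.
--
--         Args:
--             seq: The sequence of items.
--             desired: The desired removal sequence sorted by (z, y, x).
--
--         Returns:
--             True if the removal sequence matches the desired sequence, False otherwise.
--         """
--         seq = deque(seq)
--         desired = deque(desired)
--
--         while seq and desired:
--             # Determine the window of the first k items
--             window = list(seq)[:k] if len(seq) >= k else list(seq)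
--             if not window:
--                 break
--
--             # Find the item to remove based on (z, y, x)
--             # Sort the window lexicographically and pick the first item
--             min_item = min(window, key=lambda item: (item[2], item[1], item[0]))
--             min_index = window.index(min_item)
--
--             # Compare with the expected removal
--             expected_zyx = desired.popleft()
--             actual_zyx = (min_item[2], min_item[1], min_item[0])
--
--             if actual_zyx != expected_zyx:
--                 return False  # Mismatch in removal order
--
--             # Remove the item from the sequence
--             del seq[min_index]
--
--         # After processing, ensure all desired removals are done
--         return not desired and not seq
--
--     # Start backtracking
--     backtrack([])
--     return results
-- ===== SOURCE B (Python) =====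
-- def find_valid_sequences_zyx(items, k):
--     n = len(items)
--     desired = [(it[2], it[1], it[0])
--                for it in sorted(items, key=lambda it: (it[2], it[1], it[0]))]
--     if k <= 0:
--         # a non-positive buffer can never emit an item, so only the empty sequence is valid
--         return [[]] if n == 0 else []
--     results = []
--     used = [False] * n
--     chosen = []
--
--     def backtrack(buffer, pos):
--         if len(chosen) == n:
--             # flush: repeatedly remove the minimum of what is left in the buffer
--             buf, p = list(buffer), pos
--             while buf:
--                 m = min(buf, key=lambda it: (it[2], it[1], it[0]))
--                 if (m[2], m[1], m[0]) != desired[p]: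
--                     return
--                 buf.remove(m)
--                 p += 1
--             results.append([items[i] for i in chosen])
--             return
--         for i in range(n):
--             if used[i]:
--                 continue
--             nb = buffer + [items[i]]
--             np = pos
--             if len(nb) == k:
--                 m = min(nb, key=lambda it: (it[2], it[1], it[0]))
--                 if (m[2], m[1], m[0]) != desired[np]:
--                     continue  # prune: no completion of this prefix can be valid
--                 nb = [x for x in nb]
--                 nb.remove(m)
--                 np += 1
--             used[i] = True
--             chosen.append(i)
--             backtrack(nb, np)
--             chosen.pop()
--             used[i] = False
--
--     backtrack([], 0)
--     return results
-- ===== Notes on version B (the rewrite author's own statement) =====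
-- stated objective: alternative
-- what changed: A generates all n! permutations and only then runs the full buffered-removal simulation on each; B simulates the removal incrementally while building the permutation (one buffered step per appended item, flush at the end) and prunes a prefix as soon as its forced removal mismatches the sorted order, so subtrees of invalid prefixes are never visited (measured ~1.2-1.4x on random inputs; the output itself can be factorially large, which dominates at scale).
import Mathlib
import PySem

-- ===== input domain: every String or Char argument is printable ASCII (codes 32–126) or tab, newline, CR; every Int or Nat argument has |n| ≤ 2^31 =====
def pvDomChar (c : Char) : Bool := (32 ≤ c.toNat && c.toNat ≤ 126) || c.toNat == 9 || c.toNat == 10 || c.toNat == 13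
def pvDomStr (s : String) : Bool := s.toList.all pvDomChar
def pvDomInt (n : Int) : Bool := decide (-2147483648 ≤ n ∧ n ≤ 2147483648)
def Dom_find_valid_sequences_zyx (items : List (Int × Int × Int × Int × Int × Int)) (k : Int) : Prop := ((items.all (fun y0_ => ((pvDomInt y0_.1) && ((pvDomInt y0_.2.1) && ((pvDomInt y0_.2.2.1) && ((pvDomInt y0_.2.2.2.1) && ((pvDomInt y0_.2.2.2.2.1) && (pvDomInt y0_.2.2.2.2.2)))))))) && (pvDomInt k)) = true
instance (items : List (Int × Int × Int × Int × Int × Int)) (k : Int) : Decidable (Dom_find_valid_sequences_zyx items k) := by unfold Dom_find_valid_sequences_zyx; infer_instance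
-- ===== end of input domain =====

-- B replaces A's "generate every permutation, then simulate the whole buffered removal" by a
-- backtracking search that simulates the removal incrementally and prunes a prefix as soon as
-- its forced removal mismatches the sorted order (objective: alternative algorithm).

abbrev PvItem := Int × Int × Int × Int × Int × Int
abbrev PvZyx := Int × Int × Int

-- key (z, y, x) as Python compares it: lexicographically
def pvKey (it : PvItem) : Lex (Int × Lex (Int × Int)) := toLex (it.2.2.1, toLex (it.2.1, it.1))
-- the plain tuple (z, y, x), used for the == / != comparisons
def pvZyx (it : PvItem) : PvZyx := (it.2.2.1, it.2.1, it.1)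
def pvDefault : PvItem := (0, 0, 0, 0, 0, 0)

-- ===== PORT A =====
-- simulate_removal; fuel = len(seq) (each iteration deletes one element of seq)
def pvSimA (k : Int) : Nat → List PvItem → List PvZyx → Bool
  | 0, seq, desired => desired.isEmpty && seq.isEmpty
  | fuel+1, seq, desired =>
    if seq.isEmpty || desired.isEmpty then desired.isEmpty && seq.isEmpty
    else
      let window := if (seq.length : Int) ≥ k then PySem.List.slice seq none (some k) else seq
      if window.isEmpty then desired.isEmpty && seq.isEmpty
      else
        match PySem.List.min? window pvKey with
        | none => false  -- unreachable: window is nonempty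
        | some m =>
          let idx := (PySem.List.index? window m).getD 0
          match desired with
          | [] => false  -- unreachable: desired nonempty was checked above
          | e :: drest =>
            if pvZyx m ≠ e then false
            else pvSimA k fuel (seq.eraseIdx idx) drest

-- backtrack over indices; fuel = n - len(sequence)
def pvBtA (items : List PvItem) (k : Int) (desired : List PvZyx) (n : Nat) :
    Nat → List Bool → List Nat → List (List PvItem)
  | 0, _used, seq =>
      let s := seq.map (fun i => items.getD i pvDefault)
      if pvSimA k s.length s desired then [s] else []
  | fuel+1, used, seq =>
      (List.range n).foldl (fun acc i =>
        if used.getD i true then acc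
        else acc ++ pvBtA items k desired n fuel (used.set i true) (seq ++ [i])) []

def find_valid_sequences_zyx (items : List (Int × Int × Int × Int × Int × Int)) (k : Int) : List (List (Int × Int × Int × Int × Int × Int)) :=
  let n := items.length
  let desired := (PySem.List.sorted items pvKey false).map pvZyx
  pvBtA items k desired n n (List.replicate n false) []

-- ===== PORT B =====
-- flush loop at full length; fuel = len(buf)
def pvFlushB (desired : List PvZyx) : Nat → List PvItem → Nat → Bool
  | 0, buf, _p => buf.isEmpty
  | fuel+1, buf, p =>
    if buf.isEmpty then true
    else
      match PySem.List.min? buf pvKey with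
      | none => false  -- unreachable: buf is nonempty
      | some m =>
        if pvZyx m ≠ desired.getD p (0, 0, 0) then false
        else pvFlushB desired fuel ((PySem.List.remove? buf m).getD buf) (p + 1)

-- one item fed into the buffer; none = pruned (the forced removal mismatches)
def pvStepB (k : Int) (desired : List PvZyx) (buffer : List PvItem) (p : Nat) (it : PvItem) :
    Option (List PvItem × Nat) :=
  let nb := buffer ++ [it]
  if (nb.length : Int) = k then
    match PySem.List.min? nb pvKey with
    | none => none  -- unreachable: nb is nonempty
    | some m =>
      if pvZyx m = desired.getD p (0, 0, 0)
      then some ((PySem.List.remove? nb m).getD nb, p + 1)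
      else none
  else some (nb, p)

def pvBtB (items : List PvItem) (k : Int) (desired : List PvZyx) (n : Nat) :
    Nat → List Bool → List Nat → List PvItem → Nat → List (List PvItem)
  | 0, _used, chosen, buffer, p =>
      if pvFlushB desired buffer.length buffer p
      then [chosen.map (fun i => items.getD i pvDefault)] else []
  | fuel+1, used, chosen, buffer, p =>
      (List.range n).foldl (fun acc i =>
        if used.getD i true then acc
        else
          match pvStepB k desired buffer p (items.getD i pvDefault) with
          | none => acc
          | some (nb, np) =>
              acc ++ pvBtB items k desired n fuel (used.set i true) (chosen ++ [i]) nb np) []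

def find_valid_sequences_zyx_alt (items : List (Int × Int × Int × Int × Int × Int)) (k : Int) : List (List (Int × Int × Int × Int × Int × Int)) :=
  let n := items.length
  let desired := (PySem.List.sorted items pvKey false).map pvZyx
  if k ≤ 0 then (if items.isEmpty then [[]] else [])
  else pvBtB items k desired n n (List.replicate n false) [] [] 0

-- ===== PRECONDITION & SPEC =====
def Spec_find_valid_sequences_zyx (items : List (Int × Int × Int × Int × Int × Int)) (k : Int) (out : List (List (Int × Int × Int × Int × Int × Int))) : Prop := out = find_valid_sequences_zyx_alt items k
instance (items : List (Int × Int × Int × Int × Int × Int)) (k : Int) (out : List (List (Int × Int × Int × Int × Int × Int))) : Decidable (Spec_find_valid_sequences_zyx items k out) := by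
  unfold Spec_find_valid_sequences_zyx
  haveI h1 : DecidableEq (Int × Int × Int × Int × Int × Int) := inferInstance
  haveI h2 : DecidableEq (List (Int × Int × Int × Int × Int × Int)) := @instDecidableEqList _ h1
  haveI h3 : DecidableEq (List (List (Int × Int × Int × Int × Int × Int))) := @instDecidableEqList _ h2
  infer_instance

-- ===== CLAIM (what is proved, stated in full; the proofs are below) =====
def Claim_equal_find_valid_sequences_zyx : Prop := ∀ (items : List (Int × Int × Int × Int × Int × Int)) (k : Int), Dom_find_valid_sequences_zyx items k → Spec_find_valid_sequences_zyx items k (find_valid_sequences_zyx items k)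

-- ===== LEMMAS AND PROOFS =====

def pvFeedFrom (k : Int) (desired : List PvZyx) :
    List PvItem → List PvItem × Nat → Option (List PvItem × Nat)
  | [], st => some st
  | it :: s, st =>
      match pvStepB k desired st.1 st.2 it with
      | none => none
      | some st' => pvFeedFrom k desired s st'
lemma pv_erase_facts {xs : List PvItem} {m : PvItem} (hm : m ∈ xs) :
    ∃ i, PySem.List.index? xs m = some i ∧ i < xs.length ∧
      xs.eraseIdx i = xs.erase m ∧ (xs.erase m).length + 1 = xs.length := by
  induction xs with
  | nil => cases hm
  | cons x t ih =>
    by_cases hx : x = m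
    · subst hx
      exact ⟨0, PySem.List.index?_cons_self x t, by simp, by simp [List.eraseIdx],
        by simp [List.erase_cons_head]⟩
    · rcases List.mem_cons.mp hm with h | h
      · exact absurd h.symm hx
      · rcases ih h with ⟨i, hi, hlt, herase, hlen⟩
        have hbeq : ¬ (x == m) = true := by simpa using hx
        refine ⟨i + 1, ?_, by simpa using Nat.succ_lt_succ hlt, ?_, ?_⟩
        · rw [PySem.List.index?_cons_of_ne t hx, hi]; rfl
        · simp [List.eraseIdx_cons_succ, herase, List.erase_cons_tail hbeq]
        · rw [List.erase_cons_tail hbeq]; simp only [List.length_cons]; omega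

lemma pvFeedFrom_append (k : Int) (d : List PvZyx) (s t : List PvItem) (st : List PvItem × Nat) :
    pvFeedFrom k d (s ++ t) st =
      match pvFeedFrom k d s st with
      | none => none
      | some st' => pvFeedFrom k d t st' := by
  induction s generalizing st with
  | nil => simp [pvFeedFrom]
  | cons x s ih =>
    simp only [List.cons_append, pvFeedFrom]
    cases pvStepB k d st.1 st.2 x with
    | none => rfl
    | some st' => exact ih st'

lemma pvSim_eq_flush (k : Int) (d : List PvZyx) :
    ∀ (fuel : Nat) (buf : List PvItem) (p : Nat),
      buf.length = fuel → (buf.length : Int) < k → buf.length + p = d.length →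
      pvSimA k fuel buf (d.drop p) = pvFlushB d fuel buf p := by
  intro fuel
  induction fuel with
  | zero =>
    intro buf p hlen _ hsum
    have hbuf : buf = [] := List.eq_nil_of_length_eq_zero hlen
    subst hbuf
    have hp : p = d.length := by simpa using hsum
    simp [pvSimA, pvFlushB, hp, List.drop_length]
  | succ f ih =>
    intro buf p hlen hk hsum
    have hne : buf ≠ [] := by intro h; subst h; simp at hlen
    have hp : p < d.length := by omega
    have hdrop : d.drop p = d[p] :: d.drop (p + 1) := List.drop_eq_getElem_cons hp
    have hbe : buf.isEmpty = false := by simpa using hne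
    have hwnd : ¬ ((buf.length : Int) ≥ k) := by omega
    cases hmin : PySem.List.min? buf pvKey with
    | none => exact absurd ((PySem.List.min?_eq_none_iff _ _).mp hmin) hne
    | some m =>
      have hm : m ∈ buf := PySem.List.min?_mem hmin
      obtain ⟨i, hi, hilt, heri, herl⟩ := pv_erase_facts hm
      have hgd : d.getD p (0, 0, 0) = d[p] := List.getD_eq_getElem d (0,0,0) hp
      rw [hdrop]
      simp only [pvSimA, pvFlushB, hbe, List.isEmpty_cons, Bool.or_false, Bool.false_eq_true,
        if_false, if_neg hwnd, hmin, hi, hgd, PySem.List.remove?_eq_some_erase _ m hm,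
        Option.getD_some]
      by_cases hz : pvZyx m = d[p]
      · simp only [hz, ne_eq, not_true_eq_false, if_false, heri]
        exact ih (buf.erase m) (p + 1) (by omega) (by omega) (by omega)
      · simp [hz]
lemma pvSim_eq_feed (k : Int) (d : List PvZyx) (hk : 1 ≤ k) :
    ∀ (s buffer : List PvItem) (p : Nat),
      (buffer.length : Int) < k →
      buffer.length + s.length + p = d.length →
      pvSimA k (buffer ++ s).length (buffer ++ s) (d.drop p) =
        (match pvFeedFrom k d s (buffer, p) with
         | none => false
         | some st => pvFlushB d st.1.length st.1 st.2) := by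
  intro s
  induction s with
  | nil =>
    intro buffer p hb hsum
    simp only [List.append_nil, pvFeedFrom]
    exact pvSim_eq_flush k d buffer.length buffer p rfl hb (by simpa using hsum)
  | cons it s ih =>
    intro buffer p hb hsum
    rw [List.append_cons]
    by_cases hk2 : (((buffer ++ [it]).length : Int) = k)
    · -- the buffer has filled up to k: a forced removal happens now, offline and online alike
      obtain ⟨f, hf⟩ : ∃ f, ((buffer ++ [it]) ++ s).length = f + 1 :=
        ⟨buffer.length + s.length, by simp; omega⟩
      rw [hf]
      have hp : p < d.length := by simp only [List.length_cons] at hsum; omega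
      have hdrop : d.drop p = d[p] :: d.drop (p + 1) := List.drop_eq_getElem_cons hp
      have hseqne : ((buffer ++ [it]) ++ s).isEmpty = false := by simp
      have hwnd : ((((buffer ++ [it]) ++ s).length : Int) ≥ k) := by
        rw [← hk2]; simp
      have hslice : PySem.List.slice ((buffer ++ [it]) ++ s) none (some k) = buffer ++ [it] := by
        rw [← hk2, PySem.List.slice_to_natCast, List.take_left]
      cases hmin : PySem.List.min? (buffer ++ [it]) pvKey with
      | none => exact absurd ((PySem.List.min?_eq_none_iff _ _).mp hmin) (by simp)
      | some m =>
        have hm : m ∈ buffer ++ [it] := PySem.List.min?_mem hmin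
        obtain ⟨i, hi, hilt, heri, herl⟩ := pv_erase_facts hm
        have hgd : d.getD p (0, 0, 0) = d[p] := List.getD_eq_getElem d (0,0,0) hp
        have hstep : pvStepB k d buffer p it =
            (if pvZyx m = d[p]
             then some ((buffer ++ [it]).erase m, p + 1) else none) := by
          unfold pvStepB; dsimp only
          rw [if_pos hk2, hmin, hgd]
          simp [PySem.List.remove?_eq_some_erase _ m hm]
        have hwne : (buffer ++ [it]).isEmpty = false := by simp
        rw [hdrop]
        simp only [pvSimA, pvFeedFrom, hstep, hseqne, hwne, List.isEmpty_cons, Bool.or_false,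
          Bool.false_eq_true, if_false, if_pos hwnd, hslice, hmin, hi, Option.getD_some]
        by_cases hz : pvZyx m = d[p]
        · simp only [hz, ne_eq, not_true_eq_false, if_false, if_true,
            List.eraseIdx_append_of_lt_length hilt s, heri]
          have hfl : (((buffer ++ [it]).erase m) ++ s).length = f := by
            have herl' := herl
            simp at hf herl' ⊢; omega
          rw [← hfl]
          exact ih ((buffer ++ [it]).erase m) (p + 1)
            (by simp at herl hk2 ⊢; omega)
            (by simp at herl hsum ⊢; omega)
        · simp [hz]
    · -- the buffer stays below k: the item is only appended
      have hstep : pvStepB k d buffer p it = some (buffer ++ [it], p) := by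
        unfold pvStepB; dsimp only; rw [if_neg hk2]
      simp only [pvFeedFrom, hstep]
      exact ih (buffer ++ [it]) p
        (by simp only [List.length_append, List.length_cons, List.length_nil] at hk2 ⊢;
            push_cast at hk2 hb ⊢; omega)
        (by simp only [List.length_append, List.length_cons, List.length_nil] at hsum ⊢; omega)

lemma pvSimA_k_nonpos (k : Int) (hk : k ≤ 0) :
    ∀ (fuel : Nat) (seq : List PvItem) (d : List PvZyx),
      seq.length = fuel → seq ≠ [] → pvSimA k fuel seq d = false := by
  intro fuel
  induction fuel with
  | zero => intro seq d hlen hne; exact absurd (List.eq_nil_of_length_eq_zero hlen) hne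
  | succ f ih =>
    intro seq d hlen hne
    have hse : seq.isEmpty = false := by simpa using hne
    cases d with
    | nil => simp [pvSimA, hse]
    | cons e drest =>
      have hwnd : ((seq.length : Int) ≥ k) := by
        have : (0 : Int) ≤ (seq.length : Int) := by positivity
        omega
      rcases eq_or_lt_of_le hk with hk0 | hkneg
      · -- k = 0 : the window is empty, the loop breaks, the tail check fails
        have hsl : PySem.List.slice seq none (some k) = [] := by
          rw [hk0, show (0 : Int) = ((0 : Nat) : Int) by norm_num,
            PySem.List.slice_to_natCast, List.take_zero]
        simp [pvSimA, hse, hwnd, hsl]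
      · -- k < 0 : the window drops the last |k| items and eventually empties
        set j := (-k).toNat with hj
        have hjpos : 0 < j := by omega
        have hjk : -((j : Nat) : Int) = k := by omega
        have hslice : PySem.List.slice seq none (some k) = seq.take (seq.length - j) := by
          rw [← hjk]; exact PySem.List.slice_to_neg_natCast seq j hjpos
        by_cases hsj : seq.length ≤ j
        · have h0 : seq.length - j = 0 := by omega
          simp [pvSimA, hse, hwnd, hslice, h0]
        · have htlen : (seq.take (seq.length - j)).length = seq.length - j := by
            simp
          have hwne : seq.take (seq.length - j) ≠ [] := by
            intro h; rw [h] at htlen; simp at htlen; omega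
          cases hmin : PySem.List.min? (seq.take (seq.length - j)) pvKey with
          | none => exact absurd ((PySem.List.min?_eq_none_iff _ _).mp hmin) hwne
          | some m =>
            have hm : m ∈ seq.take (seq.length - j) := PySem.List.min?_mem hmin
            obtain ⟨i, hi, hilt, _, _⟩ := pv_erase_facts hm
            rw [htlen] at hilt
            have hiseq : i < seq.length := by omega
            have hwe : (seq.take (seq.length - j)).isEmpty = false := by simpa using hwne
            simp only [pvSimA, hse, List.isEmpty_cons, Bool.or_false, Bool.false_eq_true,
              if_false, if_pos hwnd, hslice, hwe, hmin, hi, Option.getD_some]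
            by_cases hz : pvZyx m = e
            · simp only [hz, ne_eq, not_true_eq_false, if_false]
              apply ih
              · rw [List.length_eraseIdx_of_lt hiseq]; omega
              · intro h
                have h2 := congrArg List.length h
                rw [List.length_eraseIdx_of_lt hiseq] at h2
                simp at h2; omega
            · simp [hz]
lemma pvFoldl_const {n : Nat} {f : List (List PvItem) → Nat → List (List PvItem)}
    (h : ∀ (acc : List (List PvItem)), ∀ i ∈ List.range n, f acc i = acc) :
    (List.range n).foldl f [] = [] := by
  rw [PySem.List.foldl_congr_mem (List.range n) f (fun acc _ => acc) [] h]
  exact PySem.List.foldl_ignore (List.range n) []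

lemma pvBtA_k_nonpos (items : List PvItem) (k : Int) (d : List PvZyx) (n : Nat) (hk : k ≤ 0)
    (hn : 1 ≤ n) :
    ∀ (fuel : Nat) (used : List Bool) (seq : List Nat),
      fuel + seq.length = n → pvBtA items k d n fuel used seq = [] := by
  intro fuel
  induction fuel with
  | zero =>
    intro used seq hsum
    have hlen : (seq.map (fun i => items.getD i pvDefault)).length = n := by
      simp; omega
    have hne : seq.map (fun i => items.getD i pvDefault) ≠ [] := by
      intro h; rw [h] at hlen; simp at hlen; omega
    simp only [pvBtA]
    rw [pvSimA_k_nonpos k hk _ _ d rfl hne]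
    rfl
  | succ f ih =>
    intro used seq hsum
    simp only [pvBtA]
    apply pvFoldl_const
    intro acc i _
    by_cases hu : used.getD i true
    · rw [if_pos hu]
    · rw [if_neg hu, ih (used.set i true) (seq ++ [i]) (by simp; omega), List.append_nil]

lemma pvBtA_of_feed_none (items : List PvItem) (k : Int) (d : List PvZyx) (n : Nat)
    (hk : 1 ≤ k) (hn : n = d.length) :
    ∀ (fuel : Nat) (used : List Bool) (seq : List Nat),
      fuel + seq.length = n →
      pvFeedFrom k d (seq.map (fun i => items.getD i pvDefault)) ([], 0) = none →
      pvBtA items k d n fuel used seq = [] := by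
  intro fuel
  induction fuel with
  | zero =>
    intro used seq hsum hfeed
    simp only [pvBtA]
    have hsim := pvSim_eq_feed k d hk (seq.map (fun i => items.getD i pvDefault)) [] 0
      (by simp; omega) (by simp; omega)
    simp only [List.nil_append, List.drop_zero, hfeed] at hsim
    rw [hsim]
    rfl
  | succ f ih =>
    intro used seq hsum hfeed
    simp only [pvBtA]
    apply pvFoldl_const
    intro acc i _
    by_cases hu : used.getD i true
    · rw [if_pos hu]
    · rw [if_neg hu, ih (used.set i true) (seq ++ [i]) (by simp; omega) ?_, List.append_nil]
      rw [List.map_append, pvFeedFrom_append, hfeed]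

lemma pvFeedFrom_singleton (k : Int) (d : List PvZyx) (x : PvItem) (st : List PvItem × Nat) :
    pvFeedFrom k d [x] st = pvStepB k d st.1 st.2 x := by
  simp only [pvFeedFrom]
  cases pvStepB k d st.1 st.2 x <;> rfl

lemma pvBtA_eq_pvBtB (items : List PvItem) (k : Int) (d : List PvZyx) (n : Nat) (hk : 1 ≤ k)
    (hn : n = d.length) :
    ∀ (fuel : Nat) (used : List Bool) (seq : List Nat) (buffer : List PvItem) (p : Nat),
      fuel + seq.length = n →
      pvFeedFrom k d (seq.map (fun i => items.getD i pvDefault)) ([], 0) = some (buffer, p) →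
      pvBtA items k d n fuel used seq = pvBtB items k d n fuel used seq buffer p := by
  intro fuel
  induction fuel with
  | zero =>
    intro used seq buffer p hsum hfeed
    simp only [pvBtA, pvBtB]
    have hsim := pvSim_eq_feed k d hk (seq.map (fun i => items.getD i pvDefault)) [] 0
      (by simp; omega) (by simp; omega)
    simp only [List.nil_append, List.drop_zero, hfeed] at hsim
    rw [hsim]
  | succ f ih =>
    intro used seq buffer p hsum hfeed
    simp only [pvBtA, pvBtB]
    apply PySem.List.foldl_congr_mem
    intro acc i _
    by_cases hu : used.getD i true
    · rw [if_pos hu, if_pos hu]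
    · rw [if_neg hu, if_neg hu]
      have hext : pvFeedFrom k d ((seq ++ [i]).map (fun j => items.getD j pvDefault)) ([], 0)
          = pvStepB k d buffer p (items.getD i pvDefault) := by
        rw [List.map_append, pvFeedFrom_append, hfeed]
        exact pvFeedFrom_singleton k d _ _
      cases hstep : pvStepB k d buffer p (items.getD i pvDefault) with
      | none =>
        rw [pvBtA_of_feed_none items k d n hk hn f (used.set i true) (seq ++ [i])
          (by simp; omega) (hext.trans hstep), List.append_nil]
      | some st =>
        rw [ih (used.set i true) (seq ++ [i]) st.1 st.2 (by simp; omega)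
          (by rw [hext, hstep])]


-- ===== VERDICT (by name: the statement is the Claim_ definition above) =====
theorem find_valid_sequences_zyx_spec : Claim_equal_find_valid_sequences_zyx := by
  intro items k _dom
  unfold Spec_find_valid_sequences_zyx
  simp only [find_valid_sequences_zyx, find_valid_sequences_zyx_alt]
  have hd : items.length = ((PySem.List.sorted items pvKey false).map pvZyx).length := by
    simp [PySem.List.length_sorted]
  by_cases hk : k ≤ 0
  · rw [if_pos hk]
    cases items with
    | nil => simp [pvBtA, pvSimA, PySem.List.sorted]
    | cons a t =>
      rw [if_neg (by simp)]
      exact pvBtA_k_nonpos (a :: t) k _ _ hk (by simp) (a :: t).length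
        (List.replicate (a :: t).length false) [] (by simp)
  · rw [if_neg hk]
    exact pvBtA_eq_pvBtB items k _ _ (by omega) hd items.length
      (List.replicate items.length false) [] [] 0 (by simp) rfl
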